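-- pv_equiv track=rewrite | github.com/khaledhassann/QR-Code-Reader | correction.py | find_points_with_yMax
-- ===== SOURCE A (Python) =====
-- def find_points_with_yMax (cont):
--
--     max_y = 0
--     max_points = []
--     for point in cont:
--         if point[0] >= max_y:
--             max_y = point[0]
--             max_points.append(point)
--     return max_points
-- ===== SOURCE B (Python) =====
-- def find_points_with_yMax(cont):
--     pts = list(cont)
--     # prefix-maximum table: pm[i] = max of first coords of pts[:i], seeded with 0
--     pm = [0]
--     for p in pts:
--         pm.append(max(pm[-1], p[0]))
--     return [p for p, t in zip(pts, pm) if p[0] >= t]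
-- ===== Notes on version B (the rewrite author's own statement) =====
-- stated objective: alternative
-- what changed: Replaces the inline running-max accumulator with two separate passes: first build a prefix-maximum table of first coordinates (seeded 0), then filter each point against its precomputed threshold via zip.
import Mathlib
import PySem

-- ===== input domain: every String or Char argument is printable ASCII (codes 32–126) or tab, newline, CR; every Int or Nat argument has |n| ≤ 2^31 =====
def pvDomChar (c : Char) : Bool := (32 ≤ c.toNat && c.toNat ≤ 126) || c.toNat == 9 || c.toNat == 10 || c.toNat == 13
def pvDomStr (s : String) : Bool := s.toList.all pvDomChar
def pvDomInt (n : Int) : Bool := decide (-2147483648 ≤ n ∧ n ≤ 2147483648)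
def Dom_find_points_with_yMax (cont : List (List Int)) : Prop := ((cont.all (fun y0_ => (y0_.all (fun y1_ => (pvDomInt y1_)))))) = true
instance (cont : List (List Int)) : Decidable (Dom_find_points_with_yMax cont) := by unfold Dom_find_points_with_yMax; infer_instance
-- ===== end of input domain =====

-- B builds a prefix-maximum table in one pass and filters against it in a second pass,
-- instead of A's single loop with an inline running-max accumulator; alternative, same cost.

-- ===== PORT A =====
-- A's loop: state (max_y, max_points); point[0] is the head (Pre_ guarantees nonempty points).
def findA (pts : List (List Int)) (max_y : Int) (max_points : List (List Int)) : List (List Int) :=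
  match pts with
  | [] => max_points
  | p :: rest =>
      if p.headI ≥ max_y then findA rest p.headI (max_points ++ [p])
      else findA rest max_y max_points

def find_points_with_yMax (cont : List (List Int)) : List (List Int) :=
  findA cont 0 []

-- ===== PORT B =====
-- pm table: buildPM pts last returns [last, max last p0, ...] (length |pts|+1, zip truncates).
def buildPM (pts : List (List Int)) (last : Int) : List Int :=
  match pts with
  | [] => [last]
  | p :: rest => last :: buildPM rest (max last p.headI)

def find_points_with_yMax_alt (cont : List (List Int)) : List (List Int) :=
  ((cont.zip (buildPM cont 0)).filter (fun q => q.1.headI ≥ q.2)).map Prod.fst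

-- ===== PRECONDITION & SPEC =====
-- Pre_ excludes inputs containing an empty point, on which A's point[0] raises IndexError.
def Pre_find_points_with_yMax (cont : List (List Int)) : Prop := ∀ p ∈ cont, p ≠ []
instance (cont : List (List Int)) : Decidable (Pre_find_points_with_yMax cont) := by unfold Pre_find_points_with_yMax; infer_instance
def pvWitness_find_points_with_yMax : List (List Int) := [[2, 1], [1, 5], [3]]
def Spec_find_points_with_yMax (cont : List (List Int)) (out : List (List Int)) : Prop := out = find_points_with_yMax_alt cont
instance (cont : List (List Int)) (out : List (List Int)) : Decidable (Spec_find_points_with_yMax cont out) := by unfold Spec_find_points_with_yMax; infer_instance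

-- ===== CLAIM (what is proved, stated in full; the proofs are below) =====
def Claim_equal_find_points_with_yMax : Prop := ∀ (cont : List (List Int)), Dom_find_points_with_yMax cont → Pre_find_points_with_yMax cont → Spec_find_points_with_yMax cont (find_points_with_yMax cont)

-- ===== LEMMAS AND PROOFS =====
theorem findA_eq (pts : List (List Int)) : ∀ (my : Int) (acc : List (List Int)),
    findA pts my acc = acc ++ ((pts.zip (buildPM pts my)).filter (fun q => q.1.headI ≥ q.2)).map Prod.fst := by
  induction pts with
  | nil => intro my acc; simp [findA, buildPM]
  | cons p rest ih =>
      intro my acc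
      simp only [findA, buildPM, List.zip_cons_cons, List.filter_cons]
      by_cases h : p.headI ≥ my
      · have hmax : max my p.headI = p.headI := max_eq_right h
        simp [h, hmax, ih]
      · have hmax : max my p.headI = my := max_eq_left (le_of_not_ge h)
        simp [h, hmax, ih]

-- ===== VERDICT (by name: the statement is the Claim_ definition above) =====
theorem find_points_with_yMax_spec : Claim_equal_find_points_with_yMax := by
  intro cont _ _
  unfold Spec_find_points_with_yMax find_points_with_yMax find_points_with_yMax_alt
  simpa using findA_eq cont 0 []
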